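-- pv_equiv track=rewrite | github.com/AdrianUtge/P4 | main.py | fourInRow
-- ===== SOURCE A (Python) =====
-- def fourInRow(liste, nbr=4):
--     """
--     fourInRow(liste [, nbr]):
--         ...
--         return winner, index_of_last_token
--
--     Vérifie si il y'a un nombre indiquée (nbr) de jeton consécutif dans la liste (liste) donnée
--     Retourne le gagnant et l'index du dernier jeton de la séquence, sinon retourne 0, 0
--
--     Paramètres:
--         - liste (list): la liste où trouver la suite de jeton, l'entier 0 est compris comme l'absence de jeton
--         - nbr (int): le nombre indiquant la séquence de jeton voulue
--             -> valeur par défaut: 4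
--     """
--     if ((length := len(liste)) < nbr): return 0, 0 #si la taille de la liste est plus petite que la séquence voulu, return 0, 0
--     player, counter = 0, 0 #player étant le joueur du jeton analysé, counter étant le compteur de ces jetons à la suite
--     for i in range(length):
--         num = liste[i]
--         if (player != num): player, counter = num, 1 #si le jeton est différent du précedent, on réinitialise player et counter
--         else: counter += bool(player) #ajoute 1 (True = 1) au compteur, n'ajoute rien (False = 0) si le jeton vaut 0
--         if (counter == nbr):
--             return player, i
--     return 0, 0
-- ===== SOURCE B (Python) =====
-- def fourInRow(liste, nbr=4):
--     """Sliding-window re-implementation: test each window of nbr tokens independently,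
--     front to back, instead of maintaining a running counter."""
--     if nbr < 1:
--         return 0, 0
--     for end in range(nbr - 1, len(liste)):
--         window = liste[end - nbr + 1:end + 1]
--         v = window[0]
--         if v != 0 and window.count(v) == nbr:
--             return v, end
--     return 0, 0
-- ===== Notes on version B (the rewrite author's own statement) =====
-- stated objective: alternative
-- what changed: Replaces A's single-pass incremental player/counter scan (with reset logic) by an independent sliding-window brute force: for each end index, slice the nbr-token window and test it with list.count, returning at the first uniform nonzero window.
import Mathlib
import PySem

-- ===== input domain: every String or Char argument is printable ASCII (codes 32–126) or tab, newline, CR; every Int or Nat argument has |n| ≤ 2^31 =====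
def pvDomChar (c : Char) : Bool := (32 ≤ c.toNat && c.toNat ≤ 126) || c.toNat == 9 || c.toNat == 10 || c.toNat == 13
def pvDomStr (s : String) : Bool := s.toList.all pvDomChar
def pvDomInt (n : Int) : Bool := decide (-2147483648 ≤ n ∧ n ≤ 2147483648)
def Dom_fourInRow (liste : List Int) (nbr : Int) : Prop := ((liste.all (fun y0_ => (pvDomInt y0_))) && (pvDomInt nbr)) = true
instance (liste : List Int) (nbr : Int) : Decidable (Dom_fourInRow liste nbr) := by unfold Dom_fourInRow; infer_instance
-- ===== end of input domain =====

-- B replaces A's incremental reset-counter scan by an independent sliding-window test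
-- (each window of nbr tokens checked on its own via count); objective: alternative.

-- ===== PORT A =====
-- A's for-loop with early return, as structural recursion carrying i, player, counter
def fourInRowLoop (xs : List Int) (i player counter nbr : Int) : Int × Int :=
  match xs with
  | [] => (0, 0)
  | num :: rest =>
    let pc : Int × Int :=
      if player ≠ num then (num, 1)
      else (player, counter + (if player ≠ 0 then (1:Int) else 0))
    if pc.2 = nbr then (pc.1, i)
    else fourInRowLoop rest (i + 1) pc.1 pc.2 nbr

def fourInRow (liste : List Int) (nbr : Int) : Int × Int :=
  if (liste.length : Int) < nbr then (0, 0)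
  else fourInRowLoop liste 0 0 0 nbr

-- ===== PORT B =====
-- Source B's for-loop over end indices range(nbr-1, len(liste)), as recursion on that index list
def altWindowLoop (liste : List Int) (nbr : Int) : List Int → Int × Int
  | [] => (0, 0)
  | e :: rest =>
    let window := PySem.List.slice liste (some (e - nbr + 1)) (some (e + 1))
    match window with
    | [] => (0, 0)   -- window[0] would raise IndexError; unreachable for the indices produced below (window always has nbr ≥ 1 elements)
    | v :: _ =>
      if v ≠ 0 ∧ (window.count v : Int) = nbr then (v, e)
      else altWindowLoop liste nbr rest

def fourInRow_alt (liste : List Int) (nbr : Int) : Int × Int :=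
  if nbr < 1 then (0, 0)
  else altWindowLoop liste nbr (PySem.List.pyRange (nbr - 1) (liste.length : Int) 1)

-- ===== PRECONDITION & SPEC =====
def Spec_fourInRow (liste : List Int) (nbr : Int) (out : Int × Int) : Prop := out = fourInRow_alt liste nbr
instance (liste : List Int) (nbr : Int) (out : Int × Int) : Decidable (Spec_fourInRow liste nbr out) := by unfold Spec_fourInRow; infer_instance

-- ===== CLAIM (what is proved, stated in full; the proofs are below) =====
def Claim_equal_fourInRow : Prop := ∀ (liste : List Int) (nbr : Int), Dom_fourInRow liste nbr → Spec_fourInRow liste nbr (fourInRow liste nbr)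

-- ===== LEMMAS AND PROOFS =====

-- proof-side suffix recursion equivalent to B's index-window loop
def altScan (nbr : Int) : List Int → Int → Int × Int
  | [], _ => (0, 0)
  | v :: rest, e =>
    if ((v :: rest).length : Int) < nbr then (0, 0)
    else if v ≠ 0 ∧ (((v :: rest).take nbr.toNat).count v : Int) = nbr then (v, e)
    else altScan nbr rest (e + 1)

theorem altScan_short (nbr : Int) (xs : List Int) (e : Int)
    (h : (xs.length : Int) < nbr) : altScan nbr xs e = (0, 0) := by
  cases xs with
  | nil => rfl
  | cons v rest => rw [altScan, if_pos h]

-- B's index loop over pyRange equals the suffix recursion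
theorem bridge (liste : List Int) (nbr : Int) (h1 : 1 ≤ nbr) :
    ∀ (m k : Nat), liste.length - k ≤ m → k ≤ liste.length →
    altWindowLoop liste nbr (PySem.List.pyRange ((k : Int) + nbr - 1) (liste.length : Int) 1)
      = altScan nbr (liste.drop k) ((k : Int) + nbr - 1) := by
  intro m
  induction m with
  | zero =>
    intro k hm hk
    have hkl : k = liste.length := by omega
    subst hkl
    rw [PySem.List.pyRange_one_eq_nil (by omega), List.drop_length]
    rfl
  | succ m ih =>
    intro k hm hk
    by_cases hend : (liste.length : Int) ≤ (k : Int) + nbr - 1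
    · rw [PySem.List.pyRange_one_eq_nil hend, altScan_short nbr _ _ (by simp; omega)]
      rfl
    · have hklt : k < liste.length := by omega
      have hknbr : k + nbr.toNat ≤ liste.length := by omega
      rw [PySem.List.pyRange_one_cons (by omega)]
      -- the window is (liste.drop k).take nbr.toNat
      have hwin : PySem.List.slice liste (some ((k : Int) + nbr - 1 - nbr + 1)) (some ((k : Int) + nbr - 1 + 1))
          = (liste.drop k).take nbr.toNat := by
        have h2 : ((k : Int) + nbr - 1 - nbr + 1) = ((k : Nat) : Int) := by omega
        have h3 : ((k : Int) + nbr - 1 + 1) = ((k : Nat) : Int) + ((nbr.toNat : Nat) : Int) := by omega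
        rw [h2, h3, PySem.List.slice_natCast_add]
      match hdrop : liste.drop k with
      | [] => exact absurd (List.drop_eq_nil_iff.mp hdrop) (by omega)
      | v :: tail =>
        have hlen2 : tail.length + 1 = liste.length - k := by
          have := congrArg List.length hdrop
          simp [List.length_drop] at this
          omega
        have hcons : (v :: tail).take nbr.toNat = v :: tail.take (nbr.toNat - 1) := by
          conv_lhs => rw [show nbr.toNat = (nbr.toNat - 1) + 1 by omega]
          rw [List.take_succ_cons]
        have hguard : ¬ (((v :: tail).length : Int) < nbr) := by
          simp only [List.length_cons]; push_cast; omega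
        have hL : altWindowLoop liste nbr
            (((k : Int) + nbr - 1) :: PySem.List.pyRange ((k : Int) + nbr - 1 + 1) (liste.length : Int) 1)
            = (if v ≠ 0 ∧ (((v :: tail).take nbr.toNat).count v : Int) = nbr
               then (v, (k : Int) + nbr - 1)
               else altWindowLoop liste nbr (PySem.List.pyRange ((k : Int) + nbr - 1 + 1) (liste.length : Int) 1)) := by
          rw [altWindowLoop]
          simp only [hwin, hdrop, hcons]
        rw [hL, altScan, if_neg hguard]
        by_cases hcond : v ≠ 0 ∧ (((v :: tail).take nbr.toNat).count v : Int) = nbr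
        · rw [if_pos hcond, if_pos hcond]
        · rw [if_neg hcond, if_neg hcond]
          have hnext : (k : Int) + nbr - 1 + 1 = ((k + 1 : Nat) : Int) + nbr - 1 := by push_cast; omega
          have htail : tail = liste.drop (k + 1) := by
            have := congrArg List.tail hdrop
            simpa [List.tail_drop] using this.symm
          rw [hnext, ih (k + 1) (by omega) (by omega), ← htail]

-- elements of a takeWhile run are all v
theorem takeWhile_run_replicate (v : Int) (xs : List Int) :
    xs.takeWhile (· = v) = List.replicate (xs.takeWhile (· = v)).length v := by
  apply List.eq_replicate_of_mem
  intro b hb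
  have := List.mem_takeWhile_imp hb
  simpa using this

-- head of dropWhile does not satisfy the predicate
theorem dropWhile_head_ne (rest : List Int) (v u : Int) (rest2 : List Int)
    (h : rest.dropWhile (· = v) = u :: rest2) : u ≠ v := by
  induction rest with
  | nil => exact absurd h (by simp)
  | cons x xs ih =>
    by_cases hx : x = v
    · exact ih (by simpa [List.dropWhile_cons, hx] using h)
    · rw [List.dropWhile_cons_of_neg (by simpa using hx)] at h
      cases h
      exact hx

-- The window test on xs = v :: rest (length ≥ nbr ≥ 1) succeeds iff the leading run of v
-- has length ≥ nbr.
theorem count_window_iff (v : Int) (rest : List Int) (nbr : Int) (h1 : 1 ≤ nbr)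
    (hlen : nbr ≤ ((v :: rest).length : Int)) :
    ((((v :: rest).take nbr.toNat).count v : Int) = nbr)
      ↔ nbr ≤ 1 + ((rest.takeWhile (· = v)).length : Int) := by
  have hdec : v :: rest = List.replicate ((rest.takeWhile (· = v)).length + 1) v
      ++ rest.dropWhile (· = v) := by
    rw [List.replicate_succ]
    conv_lhs => rw [← List.takeWhile_append_dropWhile (p := (· = v)) (l := rest)]
    rw [← List.cons_append]
    congr 2
    exact takeWhile_run_replicate v rest
  have hsplit : (rest.takeWhile (· = v)).length + (rest.dropWhile (· = v)).length
      = rest.length := by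
    conv_rhs => rw [← List.takeWhile_append_dropWhile (p := (· = v)) (l := rest)]
    rw [List.length_append]
  have hlen' : nbr ≤ (rest.length : Int) + 1 := by
    simpa using hlen
  set t := (rest.takeWhile (· = v)).length with ht
  constructor
  · intro hcount
    by_contra hlt
    have hlt' : ((t : Int) + 1 < nbr) := by omega
    have htlt : t + 1 < nbr.toNat := by omega
    have hwlen : ((v :: rest).take nbr.toNat).length = nbr.toNat := by
      simp only [List.length_take, List.length_cons]
      omega
    match hdw : rest.dropWhile (· = v) with
    | [] =>
      rw [hdw] at hsplit
      simp at hsplit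
      omega
    | u :: ys =>
      have hu : u ≠ v := dropWhile_head_ne rest v u ys hdw
      have hmem : u ∈ (v :: rest).take nbr.toNat := by
        rw [hdec, hdw, List.take_append, List.take_of_length_le
          (by simp only [List.length_replicate]; omega)]
        have hn1 : nbr.toNat - (List.replicate (t + 1) v).length
            = (nbr.toNat - (t + 1) - 1) + 1 := by simp only [List.length_replicate]; omega
        rw [hn1, List.take_succ_cons]
        exact List.mem_append_right _ List.mem_cons_self
      have hcnt : ((v :: rest).take nbr.toNat).count v = nbr.toNat := by omega
      have hall := (List.count_eq_length.mp (by rw [hcnt, hwlen])) u hmem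
      exact hu hall.symm
  · intro hge
    have htake : (v :: rest).take nbr.toNat = List.replicate nbr.toNat v := by
      rw [hdec, List.take_append_of_le_length (by simp only [List.length_replicate]; omega),
        List.take_replicate]
      congr 1
      omega
    rw [htake, List.count_replicate_self]
    omega

-- A's loop: nonnegative counter with too few remaining elements never fires
theorem loop_short (xs : List Int) : ∀ (j p c nbr : Int), 0 ≤ c → c + (xs.length : Int) < nbr →
    fourInRowLoop xs j p c nbr = (0, 0) := by
  induction xs with
  | nil => intro j p c nbr _ _; rfl
  | cons num rest ih =>
    intro j p c nbr hc hlt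
    simp only [List.length_cons] at hlt
    push_cast at hlt
    by_cases hp : p = num
    · subst hp
      by_cases h0 : p ≠ 0 <;>
        simp only [fourInRowLoop, ne_eq, not_true_eq_false, if_false, h0, if_true,
          not_false_iff, add_zero] <;>
        [rw [if_neg (by omega)]; rw [if_neg (by omega)]] <;>
        exact ih _ _ _ _ (by omega) (by omega)
    · simp only [fourInRowLoop, ne_eq, hp, not_false_iff, if_true,
        if_neg (show ¬ (1:Int) = nbr by omega)]
      exact ih _ _ _ _ (by omega) (by omega)

-- A's loop entered with player = v ≠ 0 and counter c < nbr: it counts up through the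
-- maximal run of v's, returning inside it iff nbr ≤ c + run length.
theorem loop_nonzero_run (rest : List Int) (v : Int) : ∀ (j c nbr : Int), v ≠ 0 → c < nbr →
    fourInRowLoop rest j v c nbr =
      (if nbr ≤ c + ((rest.takeWhile (· = v)).length : Int)
       then (v, j + (nbr - c) - 1)
       else fourInRowLoop (rest.dropWhile (· = v)) (j + ((rest.takeWhile (· = v)).length : Int)) v
              (c + ((rest.takeWhile (· = v)).length : Int)) nbr) := by
  induction rest with
  | nil =>
    intro j c nbr hv hc
    simp only [List.takeWhile_nil, List.dropWhile_nil, List.length_nil, Int.natCast_zero, add_zero]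
    rw [if_neg (by omega)]
  | cons u rest2 ih =>
    intro j c nbr hv hc
    by_cases hu : u = v
    · subst hu
      simp only [List.takeWhile_cons, List.dropWhile_cons, decide_true, if_true,
        List.length_cons]
      have step : fourInRowLoop (u :: rest2) j u c nbr =
          if c + 1 = nbr then (u, j) else fourInRowLoop rest2 (j + 1) u (c + 1) nbr := by
        simp only [fourInRowLoop, ne_eq, not_true_eq_false, if_false, hv, if_true, not_false_iff]
      rw [step]
      by_cases hret : c + 1 = nbr
      · rw [if_pos hret, if_pos (by push_cast; omega)]
        exact congrArg (Prod.mk _) (by omega)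
      · rw [if_neg hret, ih (j+1) (c+1) nbr hv (by omega)]
        by_cases hle : nbr ≤ c + 1 + ((rest2.takeWhile (· = u)).length : Int)
        · rw [if_pos hle, if_pos (by push_cast; omega)]
          exact congrArg (Prod.mk _) (by omega)
        · rw [if_neg hle, if_neg (by push_cast at hle ⊢; omega)]
          congr 1 <;> push_cast <;> omega
    · simp only [List.takeWhile_cons, List.dropWhile_cons, hu, decide_false,
        Bool.false_eq_true, if_false, List.length_nil, Int.natCast_zero, add_zero]
      rw [if_neg (by omega)]

-- With player = 0, the exact counter value is irrelevant as long as it never hits nbr.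
theorem loop_zero_counter (ys : List Int) (j c nbr : Int) (hc : c < nbr) (h0 : 0 < nbr) :
    fourInRowLoop ys j 0 c nbr = fourInRowLoop ys j 0 0 nbr := by
  induction ys generalizing j with
  | nil => rfl
  | cons u rest ih =>
    by_cases hu : (0:Int) = u
    · subst hu
      simp only [fourInRowLoop, ne_eq, not_true_eq_false, if_false, add_zero,
        if_neg (show ¬ c = nbr by omega), if_neg (show ¬ (0:Int) = nbr by omega)]
      exact ih (j + 1)
    · simp only [fourInRowLoop, ne_eq, hu, not_false_iff, if_true]

-- After leaving a nonzero run without returning (so nbr ≥ 2), the stale (player, counter)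
-- state behaves like the fresh zero state on the rest, whose head differs from player.
theorem loop_reset (u : Int) (rest2 : List Int) (j v c nbr : Int) (_hv : v ≠ 0) (huv : u ≠ v)
    (h2 : 2 ≤ nbr) :
    fourInRowLoop (u :: rest2) j v c nbr = fourInRowLoop (u :: rest2) j 0 0 nbr := by
  have hvu : v ≠ u := fun h => huv h.symm
  by_cases hu : u = 0
  · subst hu
    have l : fourInRowLoop ((0:Int) :: rest2) j v c nbr = fourInRowLoop rest2 (j + 1) 0 1 nbr := by
      simp only [fourInRowLoop, ne_eq, hvu, not_false_iff, if_true,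
        if_neg (show ¬ (1:Int) = nbr by omega)]
    have r : fourInRowLoop ((0:Int) :: rest2) j 0 0 nbr = fourInRowLoop rest2 (j + 1) 0 0 nbr := by
      simp only [fourInRowLoop, ne_eq, not_true_eq_false, if_false, add_zero,
        if_neg (show ¬ (0:Int) = nbr by omega)]
    rw [l, r, loop_zero_counter rest2 (j+1) 1 nbr (by omega) (by omega)]
  · have hzu : (0:Int) ≠ u := fun h => hu h.symm
    simp only [fourInRowLoop, ne_eq, hvu, hzu, not_false_iff, if_true]

-- B's suffix scan skips a run of v when no window inside it can succeed
theorem altScan_skip (v : Int) : ∀ (xs : List Int) (e nbr : Int), 1 ≤ nbr →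
    (v ≠ 0 → ((xs.takeWhile (· = v)).length : Int) < nbr) →
    altScan nbr xs e
      = altScan nbr (xs.dropWhile (· = v)) (e + ((xs.takeWhile (· = v)).length : Int)) := by
  intro xs
  induction xs with
  | nil => intro e nbr h1 _; simp [altScan]
  | cons u tail ih =>
    intro e nbr h1 hrun
    by_cases hu : u = v
    · subst hu
      simp only [List.takeWhile_cons, List.dropWhile_cons, decide_true, if_true,
        List.length_cons] at hrun ⊢
      by_cases hlen : (((u :: tail).length : Int) < nbr)
      · rw [altScan, if_pos hlen, altScan_short nbr _ _ (by
          have := List.length_dropWhile_le (fun x => decide (x = u)) tail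
          simp only [List.length_cons] at hlen
          push_cast at hlen ⊢
          omega)]
      · rw [altScan, if_neg hlen]
        by_cases hv : u = 0
        · rw [if_neg (fun hcond => hcond.1 hv)]
          rw [ih (e + 1) nbr h1 (fun hne => absurd hv hne)]
          congr 1
          push_cast
          omega
        · have hb : ((tail.takeWhile (· = u)).length : Int) + 1 < nbr := by
            have := hrun hv
            push_cast at this ⊢
            omega
          rw [if_neg (fun hcond =>
            absurd ((count_window_iff u tail nbr h1 (by omega)).mp hcond.2) (by omega))]
          rw [ih (e + 1) nbr h1 (fun _ => by omega)]
          congr 1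
          push_cast
          omega
    · have hu' : ¬ (u = v) := hu
      simp only [List.takeWhile_cons, List.dropWhile_cons, hu', decide_false,
        Bool.false_eq_true, if_false, List.length_nil, Int.natCast_zero, add_zero]

-- Main lemma: A's loop from the fresh state equals B's suffix scan (for nbr ≥ 1).
theorem main_lemma (n : Nat) : ∀ (xs : List Int), xs.length ≤ n → ∀ (j nbr : Int), 1 ≤ nbr →
    fourInRowLoop xs j 0 0 nbr = altScan nbr xs (j + nbr - 1) := by
  induction n with
  | zero =>
    intro xs hlen j nbr h1
    have : xs = [] := List.eq_nil_of_length_eq_zero (Nat.le_zero.mp hlen)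
    subst this
    rfl
  | succ n ih =>
    intro xs hlen j nbr h1
    match xs with
    | [] => rfl
    | v :: rest =>
      have hrest : rest.length ≤ n := by simpa using Nat.succ_le_succ_iff.mp hlen
      by_cases hshort : ((v :: rest).length : Int) < nbr
      · rw [loop_short _ _ _ _ _ le_rfl (by omega), altScan_short nbr _ _ hshort]
      · rw [altScan, if_neg hshort]
        by_cases hv : v = 0
        · subst hv
          have step : fourInRowLoop ((0:Int) :: rest) j 0 0 nbr = fourInRowLoop rest (j + 1) 0 0 nbr := by
            simp only [fourInRowLoop, ne_eq, not_true_eq_false, if_false, add_zero,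
              if_neg (show ¬ (0:Int) = nbr by omega)]
          rw [step, if_neg (fun hcond => hcond.1 rfl), ih rest hrest (j + 1) nbr h1]
          congr 1
          omega
        · have step : fourInRowLoop (v :: rest) j 0 0 nbr =
              if (1:Int) = nbr then (v, j) else fourInRowLoop rest (j + 1) v 1 nbr := by
            simp only [fourInRowLoop, ne_eq, (show (0:Int) ≠ v from fun h => hv h.symm),
              not_false_iff, if_true]
          rw [step]
          by_cases hrun : nbr ≤ 1 + ((rest.takeWhile (· = v)).length : Int)
          · have hcpos : v ≠ 0 ∧ ((((v :: rest).take nbr.toNat).count v : Int) = nbr) :=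
              ⟨hv, (count_window_iff v rest nbr h1 (by omega)).mpr hrun⟩
            rw [if_pos hcpos]
            by_cases h1' : (1:Int) = nbr
            · rw [if_pos h1']
              exact congrArg (Prod.mk _) (by omega)
            · rw [if_neg h1', loop_nonzero_run rest v (j + 1) 1 nbr hv (by omega),
                if_pos (by omega)]
              exact congrArg (Prod.mk _) (by omega)
          · have hcneg : ¬ (v ≠ 0 ∧ ((((v :: rest).take nbr.toNat).count v : Int) = nbr)) :=
              fun hcond => absurd ((count_window_iff v rest nbr h1 (by omega)).mp hcond.2) hrun
            have h2 : 2 ≤ nbr := by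
              have : (0:Int) ≤ ((rest.takeWhile (· = v)).length : Int) := by positivity
              omega
            rw [if_neg (show ¬ (1:Int) = nbr by omega), if_neg hcneg,
              loop_nonzero_run rest v (j + 1) 1 nbr hv (by omega), if_neg (by omega)]
            rw [altScan_skip v rest (j + nbr - 1 + 1) nbr h1 (fun _ => by omega)]
            -- the remainder after the run starts with a token ≠ v (or is empty)
            match hdw : rest.dropWhile (· = v) with
            | [] => rw [altScan_short nbr [] _ (by simp; omega)]; rfl
            | u :: rest2 =>
              have hu : u ≠ v := dropWhile_head_ne rest v u rest2 hdw
              rw [loop_reset u rest2 _ v _ nbr hv hu h2]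
              rw [← hdw]
              rw [ih (rest.dropWhile (· = v)) (Nat.le_trans (List.length_dropWhile_le _ _) hrest)
                _ nbr h1]
              congr 1
              omega

-- For nbr < 0 the counter (which stays ≥ 0) never hits nbr.
theorem loop_neg (xs : List Int) : ∀ (j p c nbr : Int), nbr < 0 → 0 ≤ c →
    fourInRowLoop xs j p c nbr = (0, 0) := by
  induction xs with
  | nil => intro j p c nbr _ _; rfl
  | cons num rest ih =>
    intro j p c nbr hn hc
    by_cases hp : p = num
    · subst hp
      by_cases h0 : p ≠ 0 <;>
        simp only [fourInRowLoop, ne_eq, not_true_eq_false, if_false, h0, if_true,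
          not_false_iff, add_zero] <;>
        [rw [if_neg (by omega)]; rw [if_neg (by omega)]] <;>
        exact ih _ _ _ _ hn (by omega)
    · simp only [fourInRowLoop, ne_eq, hp, not_false_iff, if_true,
        if_neg (show ¬ (1:Int) = nbr by omega)]
      exact ih _ _ _ _ hn (by omega)

-- Once the counter is ≥ 1 it stays ≥ 1, so it never hits nbr ≤ 0.
theorem loop_nonpos_pos (xs : List Int) : ∀ (j p c nbr : Int), nbr ≤ 0 → 1 ≤ c →
    fourInRowLoop xs j p c nbr = (0, 0) := by
  induction xs with
  | nil => intro j p c nbr _ _; rfl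
  | cons num rest ih =>
    intro j p c nbr hn hc
    by_cases hp : p = num
    · subst hp
      by_cases h0 : p ≠ 0 <;>
        simp only [fourInRowLoop, ne_eq, not_true_eq_false, if_false, h0, if_true,
          not_false_iff, add_zero] <;>
        [rw [if_neg (by omega)]; rw [if_neg (by omega)]] <;>
        exact ih _ _ _ _ hn (by omega)
    · simp only [fourInRowLoop, ne_eq, hp, not_false_iff, if_true,
        if_neg (show ¬ (1:Int) = nbr by omega)]
      exact ih _ _ _ _ hn (by omega)

-- ===== VERDICT (by name: the statement is the Claim_ definition above) =====
theorem fourInRow_spec : Claim_equal_fourInRow := by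
  unfold Claim_equal_fourInRow
  intro liste nbr _
  unfold Spec_fourInRow fourInRow fourInRow_alt
  by_cases hnbr : nbr < 1
  · rw [if_pos hnbr]
    by_cases hlen : (liste.length : Int) < nbr
    · rw [if_pos hlen]
    · rw [if_neg hlen]
      by_cases hneg : nbr < 0
      · exact loop_neg liste 0 0 0 nbr hneg le_rfl
      · have hz : nbr = 0 := by omega
        subst hz
        match liste with
        | [] => rfl
        | v :: rest =>
          by_cases hv : v = 0
          · subst hv
            simp [fourInRowLoop]
          · have step : fourInRowLoop (v :: rest) 0 0 0 0 =
                fourInRowLoop rest (0 + 1) v 1 0 := by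
              simp only [fourInRowLoop, ne_eq, (show (0:Int) ≠ v from fun h => hv h.symm),
                not_false_iff, if_true, if_neg (show ¬ (1:Int) = 0 by omega)]
            rw [step]
            exact loop_nonpos_pos rest (0 + 1) v 1 0 le_rfl le_rfl
  · rw [if_neg hnbr]
    have h1 : 1 ≤ nbr := by omega
    have hb := bridge liste nbr h1 liste.length 0 (by omega) (by omega)
    simp only [Int.natCast_zero, zero_add, List.drop_zero] at hb
    rw [hb]
    by_cases hlen : (liste.length : Int) < nbr
    · rw [if_pos hlen, altScan_short nbr liste _ hlen]
    · rw [if_neg hlen]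
      have := main_lemma liste.length liste le_rfl 0 nbr h1
      simpa using this
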